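-- pv_equiv track=rewrite | github.com/ThilakshanArulnesan/advent-of-code-2020 | solutions/d6.py | get_num_answered_by_all
-- ===== SOURCE A (Python) =====
-- def get_num_answered_by_all(group_answers):
--     # Can technically be optimized by finding the person who answered the fewest
--     characters_to_check = group_answers[0]
--     tot = 0
--
--     for character in characters_to_check:
--         did_all_answer_yes = True
--         for individual_answer in group_answers:
--             if(character not in individual_answer):
--                 did_all_answer_yes = False
--                 break
--         if(did_all_answer_yes):
--             tot += 1
--     return tot
-- ===== SOURCE B (Python) =====
-- def get_num_answered_by_all(group_answers):
--     common = set(group_answers[0])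
--     for answer in group_answers[1:]:
--         common &= set(answer)
--     return sum(1 for c in group_answers[0] if c in common)
-- ===== Notes on version B (the rewrite author's own statement) =====
-- stated objective: alternative
-- what changed: Replaced the per-character rescan of every group member by a single set intersection of all members followed by one membership pass over the first string.
import Mathlib
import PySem

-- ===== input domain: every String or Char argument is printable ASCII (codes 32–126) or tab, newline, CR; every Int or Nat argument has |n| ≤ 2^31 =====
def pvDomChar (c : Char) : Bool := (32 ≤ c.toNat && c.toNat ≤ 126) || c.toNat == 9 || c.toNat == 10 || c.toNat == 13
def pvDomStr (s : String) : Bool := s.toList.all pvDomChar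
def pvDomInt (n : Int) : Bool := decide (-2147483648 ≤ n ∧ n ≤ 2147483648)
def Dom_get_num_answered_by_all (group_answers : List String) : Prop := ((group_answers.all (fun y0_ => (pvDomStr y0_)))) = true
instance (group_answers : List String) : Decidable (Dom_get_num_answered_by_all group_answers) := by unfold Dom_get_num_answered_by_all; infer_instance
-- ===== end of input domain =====

-- B replaces A's per-character rescan of every group member by one set intersection
-- of all members plus a single membership pass over the first string (alternative algorithm).


-- ===== PORT A =====
-- inner 'for individual_answer in group_answers' loop with its break
def pvAllAnswered (c : Char) : List String → Bool
  | [] => true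
  | s :: rest => if !(s.toList.contains c) then false else pvAllAnswered c rest

def get_num_answered_by_all (group_answers : List String) : Int :=
  -- group_answers[0]: Pre_ excludes [], where Python raises IndexError
  let characters_to_check := (group_answers.headD "").toList
  characters_to_check.foldl
    (fun tot character => if pvAllAnswered character group_answers then tot + 1 else tot) 0

-- ===== PORT B =====
def get_num_answered_by_all_alt (group_answers : List String) : Int :=
  let first := (group_answers.headD "").toList
  let common := (group_answers.drop 1).foldl
    (fun acc answer => PySem.Set.inter acc answer.toList) (PySem.Set.ofList first)
  ((first.filter (fun c => PySem.Set.contains common c)).length : Int)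

-- ===== PRECONDITION & SPEC =====
-- Pre_ excludes only the empty list, on which A raises IndexError (group_answers[0]).
def Pre_get_num_answered_by_all (group_answers : List String) : Prop := group_answers ≠ []
instance (group_answers : List String) : Decidable (Pre_get_num_answered_by_all group_answers) := by unfold Pre_get_num_answered_by_all; infer_instance
def pvWitness_get_num_answered_by_all : List String := ["abc", "bcd"]

def Spec_get_num_answered_by_all (group_answers : List String) (out : Int) : Prop := out = get_num_answered_by_all_alt group_answers
instance (group_answers : List String) (out : Int) : Decidable (Spec_get_num_answered_by_all group_answers out) := by unfold Spec_get_num_answered_by_all; infer_instance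

-- ===== CLAIM (what is proved, stated in full; the proofs are below) =====
def Claim_equal_get_num_answered_by_all : Prop := ∀ (group_answers : List String), Dom_get_num_answered_by_all group_answers → Pre_get_num_answered_by_all group_answers → Spec_get_num_answered_by_all group_answers (get_num_answered_by_all group_answers)

-- ===== LEMMAS AND PROOFS =====

-- A's inner loop checks membership in every group string
theorem pvAllAnswered_iff (c : Char) (l : List String) :
    pvAllAnswered c l = true ↔ ∀ s ∈ l, c ∈ s.toList := by
  induction l with
  | nil => simp [pvAllAnswered]
  | cons s rest ih =>
    simp only [pvAllAnswered]
    by_cases h : c ∈ s.toList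
    · simp [h, ih]
    · simp [h]

-- membership in B's folded intersection
theorem mem_foldl_inter (c : Char) (init : PySem.Set Char) (l : List String) :
    c ∈ l.foldl (fun acc answer => PySem.Set.inter acc answer.toList) init ↔
      c ∈ init ∧ ∀ s ∈ l, c ∈ s.toList := by
  induction l generalizing init with
  | nil => simp
  | cons s rest ih =>
    simp only [List.foldl_cons, ih, PySem.Set.mem_inter]
    constructor
    · rintro ⟨⟨h1, h2⟩, h3⟩
      refine ⟨h1, fun t ht => ?_⟩
      rcases List.mem_cons.mp ht with rfl | ht
      · exact h2
      · exact h3 t ht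
    · rintro ⟨h1, h2⟩
      exact ⟨⟨h1, h2 s (List.mem_cons_self ..)⟩, fun t ht => h2 t (List.mem_cons_of_mem _ ht)⟩

-- A's counting loop equals the length of the filtered list
theorem foldl_count_eq_filter (p : Char → Bool) (l : List Char) (t : Int) :
    l.foldl (fun tot c => if p c then tot + 1 else tot) t
      = t + ((l.filter p).length : Int) := by
  induction l generalizing t with
  | nil => simp
  | cons c rest ih =>
    simp only [List.foldl_cons, List.filter_cons]
    by_cases h : p c
    · simp only [h, if_true, ih, List.length_cons]; push_cast; ring
    · simp [h, ih]

-- ===== VERDICT (by name: the statement is the Claim_ definition above) =====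
theorem get_num_answered_by_all_spec : Claim_equal_get_num_answered_by_all := by
  intro ga _ hpre
  obtain ⟨g0, rest, rfl⟩ : ∃ g0 rest, ga = g0 :: rest := by
    cases ga with
    | nil => exact absurd rfl hpre
    | cons a b => exact ⟨a, b, rfl⟩
  unfold Spec_get_num_answered_by_all get_num_answered_by_all get_num_answered_by_all_alt
  simp only [List.headD_cons, List.drop_one, List.tail_cons]
  rw [foldl_count_eq_filter, zero_add]
  congr 2
  apply List.filter_congr
  intro c hc
  have h0 : c ∈ PySem.Set.ofList g0.toList := by
    simpa [PySem.Set.mem_ofList] using hc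
  rw [Bool.eq_iff_iff, pvAllAnswered_iff]
  rw [show (PySem.Set.contains _ c = true) ↔ _ from PySem.Set.contains_iff _ _,
      mem_foldl_inter]
  constructor
  · rintro h
    exact ⟨h0, fun s hs => h s (List.mem_cons_of_mem _ hs)⟩
  · rintro ⟨_, h⟩ s hs
    rcases List.mem_cons.mp hs with rfl | hs
    · exact hc
    · exact h s hs
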